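-- pv_equiv track=rewrite | github.com/deskool/HarvardLibraryAPI | numRecords.py | merge_clashing_key_vals_into_dict
-- ===== SOURCE A (Python) =====
-- def merge_clashing_key_vals_into_dict(key,value):
-- 	new_data = {}
-- 	for i in range(len(key)):
-- 		if value[i] not in ['[*] text','[*] date']:
-- 			if key[i] in new_data:
-- 				new_data[key[i]] += ' ' + value[i]
-- 			else:
-- 				new_data[key[i]] = value[i]
-- 	return new_data
-- ===== SOURCE B (Python) =====
-- def merge_clashing_key_vals_into_dict(key, value):
--     kept = [(key[i], value[i]) for i in range(len(key))
--             if value[i] not in ('[*] text', '[*] date')]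
--     return {k: ' '.join(v for k2, v in kept if k2 == k)
--             for k in dict.fromkeys(k for k, _ in kept)}
-- ===== Notes on version B (the rewrite author's own statement) =====
-- stated objective: alternative
-- what changed: B first materialises the filtered (key,value) pairs, then builds the result by an outer loop over the deduplicated keys with an inner scan that collects and joins each key's fragments, instead of A's single pass that concatenates strings in place inside a dict.
import Mathlib
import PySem

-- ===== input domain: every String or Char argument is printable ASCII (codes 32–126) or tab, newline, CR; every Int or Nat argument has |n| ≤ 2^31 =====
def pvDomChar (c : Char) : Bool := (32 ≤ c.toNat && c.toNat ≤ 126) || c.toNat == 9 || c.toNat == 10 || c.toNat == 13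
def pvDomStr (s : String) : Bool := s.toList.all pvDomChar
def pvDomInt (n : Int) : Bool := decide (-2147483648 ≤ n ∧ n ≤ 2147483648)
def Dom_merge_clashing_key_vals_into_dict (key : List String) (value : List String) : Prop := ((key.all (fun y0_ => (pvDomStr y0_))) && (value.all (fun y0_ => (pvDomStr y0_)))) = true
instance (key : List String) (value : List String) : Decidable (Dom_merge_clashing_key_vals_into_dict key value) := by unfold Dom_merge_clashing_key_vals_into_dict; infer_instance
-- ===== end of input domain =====

-- B materialises the filtered (key,value) pairs, then builds the dict by an outer loop over the
-- deduplicated keys with an inner scan joining each key's fragments; objective: alternative, same order of cost.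


-- ===== PORT A =====
def merge_clashing_key_vals_into_dict (key : List String) (value : List String) : List (String × String) :=
  ((PySem.List.pyRange 0 (key.length : Int)).foldl
    (fun new_data i =>
      if PySem.List.pyGetD value i "" == "[*] text" || PySem.List.pyGetD value i "" == "[*] date" then
        new_data
      else if new_data.contains (PySem.List.pyGetD key i "") then
        new_data.insert (PySem.List.pyGetD key i "")
          (new_data.getD (PySem.List.pyGetD key i "") "" ++ (" " ++ PySem.List.pyGetD value i ""))
      else
        new_data.insert (PySem.List.pyGetD key i "") (PySem.List.pyGetD value i ""))
    PySem.Dict.empty).items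

-- ===== PORT B =====
def merge_clashing_key_vals_into_dict_alt (key : List String) (value : List String) : List (String × String) :=
  let kept : List (String × String) :=
    ((PySem.List.pyRange 0 (key.length : Int)).filter
        (fun i => !(PySem.List.pyGetD value i "" == "[*] text" ||
                    PySem.List.pyGetD value i "" == "[*] date"))).map
      (fun i => (PySem.List.pyGetD key i "", PySem.List.pyGetD value i ""))
  (PySem.List.dedup (kept.map Prod.fst)).map
    (fun k => (k, PySem.Str.join " " ((kept.filter (fun p => p.1 == k)).map Prod.snd)))

-- ===== PRECONDITION & SPEC =====
-- Pre_ excludes inputs where key is longer than value: there A raises IndexError on value[i] (and B does too).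
def Pre_merge_clashing_key_vals_into_dict (key : List String) (value : List String) : Prop :=
  key.length ≤ value.length
instance (key : List String) (value : List String) : Decidable (Pre_merge_clashing_key_vals_into_dict key value) := by unfold Pre_merge_clashing_key_vals_into_dict; infer_instance
def pvWitness_merge_clashing_key_vals_into_dict : List String × List String :=
  (["a", "b", "a"], ["x", "[*] text", "y z"])

def Spec_merge_clashing_key_vals_into_dict (key : List String) (value : List String) (out : List (String × String)) : Prop := out = merge_clashing_key_vals_into_dict_alt key value
instance (key : List String) (value : List String) (out : List (String × String)) : Decidable (Spec_merge_clashing_key_vals_into_dict key value out) := by unfold Spec_merge_clashing_key_vals_into_dict; infer_instance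

-- ===== CLAIM (what is proved, stated in full; the proofs are below) =====
def Claim_equal_merge_clashing_key_vals_into_dict : Prop := ∀ (key : List String) (value : List String), Dom_merge_clashing_key_vals_into_dict key value → Pre_merge_clashing_key_vals_into_dict key value → Spec_merge_clashing_key_vals_into_dict key value (merge_clashing_key_vals_into_dict key value)

-- ===== LEMMAS AND PROOFS =====

-- A's loop step on a (key, value) pair, with the sentinel filter already applied
def stepA (d : PySem.Dict String String) (p : String × String) : PySem.Dict String String :=
  if d.contains p.1 then d.insert p.1 (d.getD p.1 "" ++ (" " ++ p.2))
  else d.insert p.1 p.2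

-- the per-key fragments of a pair list
def frags (l : List (String × String)) (k : String) : List String :=
  (l.filter (fun p => p.1 == k)).map Prod.snd

-- B's shape: the grouped dict as a list over the deduplicated keys
def groupChar (l : List (String × String)) : List (String × String) :=
  (PySem.List.dedup (l.map Prod.fst)).map (fun k => (k, PySem.Str.join " " (frags l k)))

theorem join_singleton' (v : String) : PySem.Str.join " " [v] = v := by
  rw [← String.toList_inj, PySem.Str.toList_join]
  simp [PySem.Chars.join_singleton]

theorem chars_join_append (l : List (List Char)) (c : List Char) (h : l ≠ []) :
    PySem.Chars.join [' '] (l ++ [c]) = PySem.Chars.join [' '] l ++ [' '] ++ c := by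
  induction l with
  | nil => exact absurd rfl h
  | cons a t ih =>
    cases t with
    | nil => rw [show ([a] ++ [c] : List (List Char)) = [a, c] from rfl,
        PySem.Chars.join_cons_cons, PySem.Chars.join_singleton, PySem.Chars.join_singleton]
    | cons b t' =>
      rw [List.cons_append, List.cons_append, PySem.Chars.join_cons_cons,
        PySem.Chars.join_cons_cons, ← List.cons_append, ih (by simp)]
      simp [List.append_assoc]

theorem join_append_singleton (vs : List String) (v : String) (h : vs ≠ []) :
    PySem.Str.join " " (vs ++ [v]) = PySem.Str.join " " vs ++ (" " ++ v) := by
  rw [← String.toList_inj]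
  simp only [PySem.Str.toList_join, String.toList_append, PySem.Str.toList_join, List.map_append,
    List.map_cons, List.map_nil]
  have hsep : (" " : String).toList = [' '] := rfl
  rw [hsep, chars_join_append (vs.map String.toList) v.toList (by simpa using h)]
  simp [List.append_assoc]

theorem dedup_append_singleton (xs : List String) (x : String) :
    PySem.List.dedup (xs ++ [x]) =
      if x ∈ xs then PySem.List.dedup xs else PySem.List.dedup xs ++ [x] := by
  simp only [PySem.List.dedup_eq_ofList, PySem.Set.ofList_eq_foldl, List.foldl_append,
    List.foldl_cons, List.foldl_nil]
  rw [show (List.foldl PySem.Set.add [] xs).add x =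
    if (List.foldl PySem.Set.add [] xs).contains x then List.foldl PySem.Set.add [] xs
    else List.foldl PySem.Set.add [] xs ++ [x] from rfl]
  have hmem : (List.foldl PySem.Set.add [] xs).contains x = decide (x ∈ xs) := by
    have h2 := PySem.Set.mem_ofList (xs := xs) (y := x)
    rw [PySem.Set.ofList_eq_foldl] at h2
    by_cases hx : x ∈ xs <;> simp [hx, h2]
  rw [hmem]
  by_cases hx : x ∈ xs <;> simp [hx]

theorem frags_append (l : List (String × String)) (p : String × String) (k : String) :
    frags (l ++ [p]) k = frags l k ++ if p.1 = k then [p.2] else [] := by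
  unfold frags
  rw [List.filter_append]
  by_cases h : p.1 = k <;> simp [h]

theorem frags_ne_nil (l : List (String × String)) (k : String)
    (h : k ∈ l.map Prod.fst) : frags l k ≠ [] := by
  unfold frags
  obtain ⟨p, hp, hk⟩ := List.mem_map.1 h
  intro hnil
  rw [List.map_eq_nil_iff, List.filter_eq_nil_iff] at hnil
  exact hnil p hp (by simp [hk])

theorem frags_eq_nil (l : List (String × String)) (k : String)
    (h : k ∉ l.map Prod.fst) : frags l k = [] := by
  unfold frags
  rw [List.map_eq_nil_iff, List.filter_eq_nil_iff]
  intro p hp hpk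
  exact h (List.mem_map.2 ⟨p, hp, by simpa using hpk⟩)

-- the invariant: A's fold over the kept pairs yields exactly B's grouped list
theorem foldA_items (l : List (String × String)) :
    (l.foldl stepA PySem.Dict.empty).items = groupChar l := by
  induction l using List.reverseRecOn with
  | nil => rfl
  | append_singleton l p ih =>
    rw [List.foldl_append, List.foldl_cons, List.foldl_nil]
    set d := l.foldl stepA PySem.Dict.empty with hd
    have hkeys : d.keys = PySem.List.dedup (l.map Prod.fst) := by
      show d.items.map Prod.fst = _
      rw [ih]; unfold groupChar
      rw [List.map_map,
        show (Prod.fst ∘ fun k => (k, PySem.Str.join " " (frags l k))) = id from rfl, List.map_id]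
    have hnodup : d.keys.Nodup := by rw [hkeys]; exact PySem.List.nodup_dedup _
    have hcont : d.contains p.1 = decide (p.1 ∈ l.map Prod.fst) := by
      rw [PySem.Dict.contains_eq_decide_mem_keys, hkeys]
      simp
    unfold stepA
    by_cases hmem : p.1 ∈ l.map Prod.fst
    · -- existing key: in-place update of the joined string
      rw [hcont, if_pos (by simp [hmem])]
      have hgd : d.getD p.1 "" = PySem.Str.join " " (frags l p.1) := by
        apply PySem.Dict.getD_of_mem_items _ _ hnodup
        rw [ih]; unfold groupChar
        exact List.mem_map.2 ⟨p.1, by simp [hmem], rfl⟩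
      rw [PySem.Dict.items_insert, hcont, if_pos (by simp [hmem]), ih]
      unfold groupChar
      simp only [List.map_append, List.map_cons, List.map_nil]
      rw [dedup_append_singleton _ _, if_pos hmem, List.map_map]
      apply List.map_congr_left
      intro k hk
      rw [frags_append]
      by_cases hkp : k = p.1
      · subst hkp
        simp only [Function.comp_apply, beq_self_eq_true, if_true]
        rw [hgd, ← join_append_singleton _ _ (frags_ne_nil l p.1 hmem)]
      · have h1 : (k == p.1) = false := by simp [hkp]
        have h2 : ¬ p.1 = k := fun hx => hkp hx.symm
        simp [h2, hkp]
    · -- fresh key: append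
      rw [hcont, if_neg (by simp [hmem])]
      rw [PySem.Dict.items_insert, hcont, if_neg (by simp [hmem]), ih]
      unfold groupChar
      simp only [List.map_append, List.map_cons, List.map_nil]
      rw [dedup_append_singleton _ _, if_neg hmem, List.map_append]
      congr 1
      · apply List.map_congr_left
        intro k hk
        rw [frags_append, if_neg (by rintro rfl; exact hmem ((PySem.List.mem_dedup _ _).1 hk))]
        simp
      · simp only [List.map_cons, List.map_nil]
        rw [frags_append, frags_eq_nil l p.1 hmem, if_pos rfl, List.nil_append, join_singleton']

theorem zip_eq_map_range (key value : List String) (h : key.length ≤ value.length) :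
    key.zip value = (List.range key.length).map
      (fun i => (key.getD i "", value.getD i "")) := by
  apply List.ext_getElem
  · simp; omega
  · intro i h1 h2
    have hik : i < key.length := by simpa using h2
    have hiv : i < value.length := by omega
    simp [List.getElem_zip, hik, hiv]

def keepPred (p : String × String) : Bool := !(p.2 == "[*] text" || p.2 == "[*] date")

theorem portA_eq (key value : List String) (h : key.length ≤ value.length) :
    merge_clashing_key_vals_into_dict key value =
      (((key.zip value).filter keepPred).foldl stepA PySem.Dict.empty).items := by
  unfold merge_clashing_key_vals_into_dict
  rw [List.foldl_filter, zip_eq_map_range key value h, List.foldl_map,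
    PySem.List.pyRange_zero_natCast, List.foldl_map]
  congr 1
  apply PySem.List.foldl_congr_mem
  intro d i _
  simp only [PySem.List.pyGetD_natCast, keepPred, stepA]
  by_cases hb : (value.getD i "" == "[*] text" || value.getD i "" == "[*] date") = true <;> simp_all
  intro hA hB
  rcases hb with hb | hb
  · exact absurd hb hA
  · exact absurd hb hB

theorem portB_eq (key value : List String) (h : key.length ≤ value.length) :
    merge_clashing_key_vals_into_dict_alt key value =
      groupChar ((key.zip value).filter keepPred) := by
  unfold merge_clashing_key_vals_into_dict_alt groupChar frags
  have hkept :
      ((PySem.List.pyRange 0 (key.length : Int)).filter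
          (fun i => !(PySem.List.pyGetD value i "" == "[*] text" ||
                      PySem.List.pyGetD value i "" == "[*] date"))).map
        (fun i => (PySem.List.pyGetD key i "", PySem.List.pyGetD value i "")) =
      (key.zip value).filter keepPred := by
    rw [zip_eq_map_range key value h, PySem.List.pyRange_zero_natCast,
      List.filter_map, List.filter_map, List.map_map]
    congr 1
    · funext i; simp [PySem.List.pyGetD_natCast]
    · congr 1; funext i; simp [keepPred, PySem.List.pyGetD_natCast]
  rw [hkept]

-- ===== VERDICT (by name: the statement is the Claim_ definition above) =====
theorem merge_clashing_key_vals_into_dict_spec : Claim_equal_merge_clashing_key_vals_into_dict := by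
  intro key value _ hpre
  unfold Spec_merge_clashing_key_vals_into_dict
  rw [portA_eq key value hpre, portB_eq key value hpre, foldA_items]
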